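-- pv_equiv track=rewrite | github.com/quickthom/aoc | 2023/day5.py | apply_map
-- ===== SOURCE A (Python) =====
-- def apply_map(map, values):
--     ret = []
--     for v in values:
--         v2 = v
--         for lo, hi, mod in map:
--             if v >= lo and v <= hi:
--                 v2 += mod
--         ret.append(v2)
--     return ret
-- ===== SOURCE B (Python) =====
-- def apply_map(map, values):
--     # Sweep-line data: interval endpoint events, sorted by position, with
--     # prefix sums of the deltas; each value is answered by one binary search.
--     events = []
--     for lo, hi, mod in map:
--         if lo <= hi:
--             events.append((lo, mod))
--             events.append((hi + 1, -mod))
--     events.sort(key=lambda e: e[0])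
--     xs = [p for p, _ in events]
--     prefix = [0]
--     s = 0
--     for _, d in events:
--         s += d
--         prefix.append(s)
--
--     def upper(v):
--         lo, hi = 0, len(xs)
--         while lo < hi:
--             mid = (lo + hi) // 2
--             if xs[mid] <= v:
--                 lo = mid + 1
--             else:
--                 hi = mid
--         return lo
--
--     return [v + prefix[upper(v)] for v in values]
-- ===== Notes on version B (the rewrite author's own statement) =====
-- stated objective: faster
-- what changed: Replaces the per-value scan of all intervals by a sweep-line index: interval endpoints become sorted +mod/-mod events with prefix sums, and each value is answered by one binary search over the event positions.
import Mathlib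
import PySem

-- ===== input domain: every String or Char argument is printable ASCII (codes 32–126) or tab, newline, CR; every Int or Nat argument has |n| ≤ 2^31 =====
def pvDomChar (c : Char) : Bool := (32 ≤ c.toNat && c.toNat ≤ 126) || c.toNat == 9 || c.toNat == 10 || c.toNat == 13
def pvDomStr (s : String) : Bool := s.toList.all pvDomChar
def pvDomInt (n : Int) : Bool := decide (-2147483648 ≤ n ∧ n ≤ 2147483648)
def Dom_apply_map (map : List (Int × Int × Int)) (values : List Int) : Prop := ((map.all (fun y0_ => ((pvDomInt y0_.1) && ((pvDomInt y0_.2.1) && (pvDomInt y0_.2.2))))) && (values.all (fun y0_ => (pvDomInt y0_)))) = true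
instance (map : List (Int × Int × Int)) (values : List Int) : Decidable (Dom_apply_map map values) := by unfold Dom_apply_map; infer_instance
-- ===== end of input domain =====

-- B replaces A's per-value scan of every interval by a sorted endpoint-event
-- index with prefix sums, answering each value with one binary search (faster).

-- ===== PORT A =====
def apply_map (map : List (Int × Int × Int)) (values : List Int) : List Int :=
  values.foldl (fun ret v =>
    ret ++ [map.foldl (fun v2 t => if v ≥ t.1 ∧ v ≤ t.2.1 then v2 + t.2.2 else v2) v]) []

-- ===== PORT B =====
-- Source B's hand-written `upper` while-loop: lo, hi are list indices (always ≥ 0),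
-- so they are Nat here and Python's (lo+hi)//2 is Nat division; xs[mid] always
-- has 0 ≤ mid < len(xs), so `getD mid 0` is exact there.
def bsUpper (xs : List Int) (v : Int) (lo hi : Nat) : Nat :=
  if _h : lo < hi then
    let mid := (lo + hi) / 2
    if xs.getD mid 0 ≤ v then bsUpper xs v (mid + 1) hi else bsUpper xs v lo mid
  else lo
termination_by hi - lo
decreasing_by all_goals omega

def apply_map_alt (map : List (Int × Int × Int)) (values : List Int) : List Int :=
  let events := map.foldl (fun acc t =>
    if t.1 ≤ t.2.1 then acc ++ [(t.1, t.2.2), (t.2.1 + 1, -t.2.2)] else acc) []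
  let evs := PySem.List.sorted events (fun e => e.1) false
  let xs := evs.map (fun e => e.1)
  -- prefix[upper(v)] always has index 0 ≤ k ≤ len(xs) < len(prefix), so getD is exact
  let pre := (evs.foldl (fun (p : List Int × Int) e => (p.1 ++ [p.2 + e.2], p.2 + e.2)) ([0], 0)).1
  values.map (fun v => v + pre.getD (bsUpper xs v 0 xs.length) 0)

-- ===== PRECONDITION & SPEC =====
def Spec_apply_map (map : List (Int × Int × Int)) (values : List Int) (out : List Int) : Prop := out = apply_map_alt map values
instance (map : List (Int × Int × Int)) (values : List Int) (out : List Int) : Decidable (Spec_apply_map map values out) := by unfold Spec_apply_map; infer_instance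

-- ===== CLAIM (what is proved, stated in full; the proofs are below) =====
def Claim_equal_apply_map : Prop := ∀ (map : List (Int × Int × Int)) (values : List Int), Dom_apply_map map values → Spec_apply_map map values (apply_map map values)

-- ===== LEMMAS AND PROOFS =====

-- total offset A adds to a value v
def offS (map : List (Int × Int × Int)) (v : Int) : Int :=
  (map.map (fun t => if t.1 ≤ v ∧ v ≤ t.2.1 then t.2.2 else 0)).sum

lemma foldA (map : List (Int × Int × Int)) (v a : Int) :
    map.foldl (fun v2 t => if v ≥ t.1 ∧ v ≤ t.2.1 then v2 + t.2.2 else v2) a = a + offS map v := by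
  induction map generalizing a with
  | nil => simp [offS]
  | cons t r ih =>
    simp only [List.foldl_cons, offS, List.map_cons, List.sum_cons] at *
    split_ifs with h <;> rw [ih] <;> omega

lemma A_eq (map : List (Int × Int × Int)) (values : List Int) :
    apply_map map values = values.map (fun v => v + offS map v) := by
  unfold apply_map
  rw [PySem.List.foldl_append_singleton_eq_map]
  simp [foldA]

-- event-list value at v
def gval (L : List (Int × Int)) (v : Int) : Int :=
  (L.map (fun e => if e.1 ≤ v then e.2 else 0)).sum

def evOf (t : Int × Int × Int) : List (Int × Int) :=
  if t.1 ≤ t.2.1 then [(t.1, t.2.2), (t.2.1 + 1, -t.2.2)] else []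

lemma events_eq (map : List (Int × Int × Int)) (acc : List (Int × Int)) :
    map.foldl (fun acc t =>
      if t.1 ≤ t.2.1 then acc ++ [(t.1, t.2.2), (t.2.1 + 1, -t.2.2)] else acc) acc
      = acc ++ map.flatMap evOf := by
  have h : (fun (a : List (Int × Int)) (t : Int × Int × Int) =>
      if t.1 ≤ t.2.1 then a ++ [(t.1, t.2.2), (t.2.1 + 1, -t.2.2)] else a)
      = fun a t => a ++ evOf t := by
    funext a t; unfold evOf; split_ifs <;> simp
  rw [h, PySem.List.foldl_append_eq_flatMap]

lemma gval_append (L L' : List (Int × Int)) (v : Int) :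
    gval (L ++ L') v = gval L v + gval L' v := by
  simp [gval]

lemma gval_flatMap (map : List (Int × Int × Int)) (v : Int) :
    gval (map.flatMap evOf) v = offS map v := by
  induction map with
  | nil => simp [gval, offS]
  | cons t r ih =>
    rw [List.flatMap_cons, gval_append, ih]
    have : gval (evOf t) v = if t.1 ≤ v ∧ v ≤ t.2.1 then t.2.2 else 0 := by
      unfold evOf gval
      split_ifs <;>
        simp only [List.map_cons, List.map_nil, List.sum_cons, List.sum_nil] <;> omega
    simp [offS, this]

lemma gval_perm {L L' : List (Int × Int)} (h : L.Perm L') (v : Int) : gval L v = gval L' v :=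
  (h.map _).sum_eq

-- prefix-sum list built by Source B's loop
def psum (s : Int) : List (Int × Int) → List Int
  | [] => []
  | e :: t => (s + e.2) :: psum (s + e.2) t

lemma pre_fold (L : List (Int × Int)) (acc : List Int) (s : Int) :
    L.foldl (fun p e => (p.1 ++ [p.2 + e.2], p.2 + e.2)) (acc, s)
      = (acc ++ psum s L, s + (L.map (fun e => e.2)).sum) := by
  induction L generalizing acc s with
  | nil => simp [psum]
  | cons e t ih => simp [psum, ih, add_assoc]

lemma psum_getD (L : List (Int × Int)) (k : Nat) (s : Int) (hk : k ≤ L.length) :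
    (s :: psum s L).getD k 0 = s + ((L.take k).map (fun e => e.2)).sum := by
  induction L generalizing k s with
  | nil =>
    have hk0 : k = 0 := by simpa using hk
    subst hk0; simp [psum]
  | cons e t ih =>
    cases k with
    | zero => simp
    | succ k =>
      simp only [List.length_cons] at hk
      have := ih k (s + e.2) (by omega)
      simpa [psum, add_assoc] using this

lemma getD_mono (xs : List Int) (hxs : xs.Pairwise (· ≤ ·)) {i j : Nat}
    (hij : i ≤ j) (hj : j < xs.length) : xs.getD i 0 ≤ xs.getD j 0 := by
  rw [List.getD_eq_getElem xs 0 (by omega), List.getD_eq_getElem xs 0 hj]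
  rcases Nat.lt_or_ge i j with h | h
  · exact (List.pairwise_iff_getElem.mp hxs) i j (by omega) hj h
  · have : i = j := by omega
    subst this; rfl

lemma bs_spec (xs : List Int) (v : Int) (hxs : xs.Pairwise (· ≤ ·)) :
    ∀ lo hi : Nat, lo ≤ hi → hi ≤ xs.length →
      lo ≤ bsUpper xs v lo hi ∧ bsUpper xs v lo hi ≤ hi ∧
      (∀ i, lo ≤ i → i < bsUpper xs v lo hi → xs.getD i 0 ≤ v) ∧
      (∀ i, bsUpper xs v lo hi ≤ i → i < hi → v < xs.getD i 0) := by
  intro lo hi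
  induction lo, hi using bsUpper.induct xs v with
  | case1 lo hi h mid hle ih =>
    intro _ hhi
    rw [bsUpper, dif_pos h, if_pos hle]
    have hmid : mid = (lo + hi) / 2 := rfl
    rw [← hmid]
    obtain ⟨h1, h2, h3, h4⟩ := ih (by omega) hhi
    refine ⟨by omega, h2, ?_, h4⟩
    intro i hi1 hi2
    rcases Nat.lt_or_ge i (mid + 1) with hc | hc
    · exact le_trans (getD_mono xs hxs (by omega) (by omega)) hle
    · exact h3 i hc hi2
  | case2 lo hi h mid hgt ih =>
    intro _ hhi
    rw [bsUpper, dif_pos h, if_neg hgt]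
    have hmid : mid = (lo + hi) / 2 := rfl
    rw [← hmid]
    obtain ⟨h1, h2, h3, h4⟩ := ih (by omega) (by omega)
    refine ⟨h1, by omega, h3, ?_⟩
    intro i hi1 hi2
    rcases Nat.lt_or_ge i mid with hc | hc
    · exact h4 i hi1 hc
    · calc v < xs.getD mid 0 := by omega
        _ ≤ xs.getD i 0 := getD_mono xs hxs hc (by omega)
  | case3 lo hi h =>
    intro hle _
    rw [bsUpper, dif_neg h]
    exact ⟨le_refl _, by omega, fun i h1 h2 => by omega, fun i h1 h2 => by omega⟩

lemma gval_take (evs : List (Int × Int)) (v : Int) (k : Nat) (hk : k ≤ evs.length)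
    (hle : ∀ i, i < k → (evs.map (fun e => e.1)).getD i 0 ≤ v)
    (hgt : ∀ i, k ≤ i → i < evs.length → v < (evs.map (fun e => e.1)).getD i 0) :
    gval evs v = ((evs.take k).map (fun e => e.2)).sum := by
  conv_lhs => rw [← List.take_append_drop k evs]
  rw [gval_append]
  have h1 : gval (evs.take k) v = ((evs.take k).map (fun e => e.2)).sum := by
    unfold gval
    congr 1
    apply List.map_congr_left
    intro e he
    obtain ⟨i, hi, hei⟩ := List.mem_iff_getElem.mp he
    have hik : i < k := by have := hi; simp [List.length_take] at this; omega
    have hil : i < evs.length := by omega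
    have : e.1 ≤ v := by
      have := hle i hik
      rw [List.getD_eq_getElem _ 0 (by simpa using hil), List.getElem_map] at this
      rw [← hei, List.getElem_take]
      exact this
    simp [this]
  have h2 : gval (evs.drop k) v = 0 := by
    unfold gval
    apply List.sum_eq_zero
    intro x hx
    obtain ⟨e, he, hex⟩ := List.mem_map.mp hx
    obtain ⟨i, hi, hei⟩ := List.mem_iff_getElem.mp he
    have hil : k + i < evs.length := by have := hi; simp [List.length_drop] at this; omega
    have : v < e.1 := by
      have := hgt (k + i) (by omega) hil
      rw [List.getD_eq_getElem _ 0 (by simpa using hil), List.getElem_map] at this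
      rw [← hei, List.getElem_drop]
      exact this
    rw [← hex, if_neg (by omega)]
  rw [h1, h2, add_zero]

lemma B_eq (map : List (Int × Int × Int)) (values : List Int) :
    apply_map_alt map values = values.map (fun v => v + offS map v) := by
  unfold apply_map_alt
  rw [events_eq]
  simp only [List.nil_append]
  set E := map.flatMap evOf with hE
  set evs := PySem.List.sorted E (fun e => e.1) false with hevs
  have hperm : evs.Perm E := PySem.List.sorted_perm E _ _
  have hpair : (evs.map (fun e => e.1)).Pairwise (· ≤ ·) := by
    simpa using PySem.List.sorted_map_key_pairwise E (fun e => e.1)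
  apply List.map_congr_left
  intro v _
  congr 1
  rw [pre_fold]
  set k := bsUpper (evs.map fun e => e.1) v 0 (evs.map fun e => e.1).length with hk
  obtain ⟨-, h2, h3, h4⟩ := bs_spec (evs.map fun e => e.1) v hpair 0
    (evs.map fun e => e.1).length (by omega) (le_refl _)
  have hklen : k ≤ evs.length := by
    rw [← hk] at h2; exact le_trans h2 (by simp)
  have : ([0] ++ psum 0 evs).getD k 0 = 0 + ((evs.take k).map (fun e => e.2)).sum := by
    simpa using psum_getD evs k 0 hklen
  rw [this, zero_add]
  rw [← gval_take evs v k hklen (fun i hik => h3 i (by omega) hik)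
        (fun i h1 h2 => h4 i h1 (by simpa using h2))]
  rw [gval_perm hperm v, gval_flatMap]

-- ===== VERDICT (by name: the statement is the Claim_ definition above) =====
theorem apply_map_spec : Claim_equal_apply_map := by
  intro map values _
  unfold Spec_apply_map
  rw [A_eq, B_eq]
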